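-- pv_equiv track=rewrite | github.com/openvinotoolkit/npu_plugin | tools/models_reporter/parse.py | find_name_and_opset
-- ===== SOURCE A (Python) =====
-- def find_name_and_opset(layer_names, all_layers_with_opsets):
--     found = set()
--     for layer_name in layer_names:
--         try:
--             layers = ((name, opset)
--                       for name, opset in all_layers_with_opsets if name == layer_name)
--             found.update(layers)
--         except ValueError:
--             found.add((layer_name, "unknown"))
--
--     return list(found)
-- ===== SOURCE B (Python) =====
-- def find_name_and_opset(layer_names, all_layers_with_opsets):
--     by_name = {}
--     for name, opset in all_layers_with_opsets:
--         by_name.setdefault(name, []).append(opset)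
--     found = set()
--     for layer_name in layer_names:
--         found.update((layer_name, opset) for opset in by_name.get(layer_name, []))
--     return list(found)
-- ===== Notes on version B (the rewrite author's own statement) =====
-- stated objective: faster
-- what changed: Replaces the nested scan (for each layer name, re-filter the whole data list) with a name->opsets dict built in one pass over the data, then a single loop over layer_names with O(1) lookups.
import Mathlib
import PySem

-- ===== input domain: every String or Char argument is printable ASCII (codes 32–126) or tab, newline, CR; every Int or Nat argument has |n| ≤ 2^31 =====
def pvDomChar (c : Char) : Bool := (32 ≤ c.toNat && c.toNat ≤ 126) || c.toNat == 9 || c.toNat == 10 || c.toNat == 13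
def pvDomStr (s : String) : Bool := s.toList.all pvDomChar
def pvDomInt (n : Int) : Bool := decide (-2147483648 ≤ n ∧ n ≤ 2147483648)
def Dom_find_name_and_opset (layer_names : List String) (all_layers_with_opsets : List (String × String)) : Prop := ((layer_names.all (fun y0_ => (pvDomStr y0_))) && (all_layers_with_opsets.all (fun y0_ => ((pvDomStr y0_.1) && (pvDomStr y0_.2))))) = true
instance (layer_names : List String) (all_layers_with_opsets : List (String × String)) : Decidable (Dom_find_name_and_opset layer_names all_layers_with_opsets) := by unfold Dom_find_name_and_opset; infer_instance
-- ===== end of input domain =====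

-- B replaces A's nested scan (re-filter the data list per layer name) with a name->opsets
-- dict built in one pass, then a single loop over layer_names; return value as a set of pairs.

-- ===== PORT A =====
-- try/except: the ValueError branch of A is unreachable (the generator raises no ValueError), so it is not ported.
def find_name_and_opset (layer_names : List String) (all_layers_with_opsets : List (String × String)) : List (String × String) :=
  layer_names.foldl
    (fun found layer_name =>
      PySem.Set.update found
        (all_layers_with_opsets.filter (fun p => p.1 == layer_name)))
    PySem.Set.empty

-- ===== PORT B =====
def find_name_and_opset_alt (layer_names : List String) (all_layers_with_opsets : List (String × String)) : List (String × String) :=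
  let by_name : PySem.Dict String (List String) :=
    all_layers_with_opsets.foldl (fun d p => d.modify p.1 [] (· ++ [p.2])) PySem.Dict.empty
  layer_names.foldl
    (fun found layer_name =>
      PySem.Set.update found
        ((by_name.getD layer_name []).map (fun opset => (layer_name, opset))))
    PySem.Set.empty

-- ===== PRECONDITION & SPEC =====
def Spec_find_name_and_opset (layer_names : List String) (all_layers_with_opsets : List (String × String)) (out : List (String × String)) : Prop := out = find_name_and_opset_alt layer_names all_layers_with_opsets
instance (layer_names : List String) (all_layers_with_opsets : List (String × String)) (out : List (String × String)) : Decidable (Spec_find_name_and_opset layer_names all_layers_with_opsets out) := by unfold Spec_find_name_and_opset; infer_instance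

-- ===== CLAIM (what is proved, stated in full; the proofs are below) =====
def Claim_equal_find_name_and_opset : Prop := ∀ (layer_names : List String) (all_layers_with_opsets : List (String × String)), Dom_find_name_and_opset layer_names all_layers_with_opsets → Spec_find_name_and_opset layer_names all_layers_with_opsets (find_name_and_opset layer_names all_layers_with_opsets)

-- ===== LEMMAS AND PROOFS =====
-- re-pairing the grouped opsets with their key gives back exactly the filtered pairs
theorem pv_filter_repair (l : List (String × String)) (k : String) :
    ((l.filter (fun p => p.1 == k)).map (·.2)).map (fun opset => (k, opset))
      = l.filter (fun p => p.1 == k) := by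
  induction l with
  | nil => rfl
  | cons p rest ih =>
    obtain ⟨a, b⟩ := p
    by_cases h : a = k
    · subst h
      simp [ih]
    · simp [beq_eq_false_iff_ne.mpr h, ih]

-- ===== VERDICT (by name: the statement is the Claim_ definition above) =====
theorem find_name_and_opset_spec : Claim_equal_find_name_and_opset := by
  intro layer_names all_layers_with_opsets _
  unfold Spec_find_name_and_opset find_name_and_opset find_name_and_opset_alt
  congr 1
  funext found layer_name
  rw [PySem.Dict.getD_foldl_modify_append, PySem.Dict.getD_empty, List.nil_append,
    pv_filter_repair]
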